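-- pv_equiv track=rewrite | github.com/bhavanam2801/tourism-multi-agent | python_app/agents/places.py | _uniq_names
-- ===== SOURCE A (Python) =====
-- def _uniq_names(elements):
--     s = set()
--     out = []
--     for el in elements:
--         tags = el.get("tags", {})
--         name = tags.get("name")
--         if not name:
--             continue
--         if name in s:
--             continue
--         s.add(name)
--         out.append(name)
--         if len(out) >= 5:
--             break
--     return out
-- ===== SOURCE B (Python) =====
-- def _uniq_names(elements):
--     names = [el.get("tags", {}).get("name") for el in elements]
--
--     def keep(prefix, rest):
--         # first-occurrence filter: keep a truthy name iff it did not appear earlier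
--         if not rest:
--             return []
--         n, tail = rest[0], rest[1:]
--         if n and n not in prefix:
--             return [n] + keep(prefix + [n], tail)
--         return keep(prefix + [n], tail)
--
--     return keep([], names)[:5]
-- ===== Notes on version B (the rewrite author's own statement) =====
-- stated objective: alternative
-- what changed: Replaces A's single fused loop with mutable set/list state and an early break at 5 by a recursive first-occurrence filter that decides uniqueness by membership in the already-processed prefix list (no set, no break), slicing to 5 at the end.
import Mathlib
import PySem

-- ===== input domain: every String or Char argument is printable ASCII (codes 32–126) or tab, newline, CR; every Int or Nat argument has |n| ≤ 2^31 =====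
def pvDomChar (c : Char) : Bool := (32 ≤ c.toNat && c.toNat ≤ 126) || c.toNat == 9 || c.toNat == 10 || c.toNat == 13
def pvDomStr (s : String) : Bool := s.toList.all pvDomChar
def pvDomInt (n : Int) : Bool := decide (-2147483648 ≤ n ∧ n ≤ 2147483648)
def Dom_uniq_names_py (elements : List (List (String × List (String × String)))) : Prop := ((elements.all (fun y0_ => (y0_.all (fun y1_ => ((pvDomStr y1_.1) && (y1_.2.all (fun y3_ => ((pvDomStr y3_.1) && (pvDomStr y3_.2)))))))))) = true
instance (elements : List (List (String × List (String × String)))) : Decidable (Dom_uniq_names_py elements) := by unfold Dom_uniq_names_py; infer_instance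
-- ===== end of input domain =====

-- B replaces A's fused early-breaking loop (set + list + break at 5) by a recursive
-- first-occurrence filter that tests membership in the already-processed pre list
-- (no set, no break), then slices to the first 5 ("alternative").


-- ===== PORT A =====
-- A's loop: walk the elements carrying the seen-set `s` and the output `out`,
-- skip falsy and seen names, break as soon as out reaches 5 entries.
def uniqGoA (els : List (List (String × List (String × String))))
    (s : PySem.Set String) (out : List String) : List String :=
  match els with
  | [] => out
  | el :: rest =>
    let tags := (PySem.Dict.mk el).getD "tags" []
    match (PySem.Dict.mk tags).get? "name" with
    | none => uniqGoA rest s out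
    | some name =>
      if name = "" then uniqGoA rest s out
      else if PySem.Set.contains s name then uniqGoA rest s out
      else
        let s' := PySem.Set.add s name
        let out' := out ++ [name]
        if 5 ≤ out'.length then out' else uniqGoA rest s' out'

def uniq_names_py (elements : List (List (String × List (String × String)))) : List String :=
  uniqGoA elements PySem.Set.empty []

-- ===== PORT B =====
-- Source B's inner `keep(pre, rest)`: recursion over the name list, keeping a truthy
-- name iff it is not in the already-processed pre list (quadratic membership test).
def keepB (pre : List (Option String)) (rest : List (Option String)) : List String :=
  match rest with
  | [] => []
  | n? :: tail =>
    match n? with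
    | some n =>
      if n ≠ "" ∧ ¬ pre.contains (some n) then n :: keepB (pre ++ [some n]) tail
      else keepB (pre ++ [some n]) tail
    | none => keepB (pre ++ [none]) tail

def uniq_names_py_alt (elements : List (List (String × List (String × String)))) : List String :=
  let names := elements.map (fun el =>
    (PySem.Dict.mk ((PySem.Dict.mk el).getD "tags" [])).get? "name")
  (keepB [] names).take 5

-- ===== PRECONDITION & SPEC =====
def Spec_uniq_names_py (elements : List (List (String × List (String × String)))) (out : List String) : Prop := out = uniq_names_py_alt elements
instance (elements : List (List (String × List (String × String)))) (out : List String) : Decidable (Spec_uniq_names_py elements out) := by unfold Spec_uniq_names_py; infer_instance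

-- ===== CLAIM (what is proved, stated in full; the proofs are below) =====
def Claim_equal_uniq_names_py : Prop := ∀ (elements : List (List (String × List (String × String)))), Dom_uniq_names_py elements → Spec_uniq_names_py elements (uniq_names_py elements)

-- ===== LEMMAS AND PROOFS =====

-- A's loop replayed on the pre-extracted list of truthy names.
def uniqLoop (ns : List String) (s : PySem.Set String) (out : List String) : List String :=
  match ns with
  | [] => out
  | n :: rest =>
    if PySem.Set.contains s n then uniqLoop rest s out
    else
      let out' := out ++ [n]
      if 5 ≤ out'.length then out' else uniqLoop rest (PySem.Set.add s n) out'

-- first-occurrence dedup relative to an already-seen set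
def uniqDed (s : PySem.Set String) (ns : List String) : List String :=
  match ns with
  | [] => []
  | n :: rest =>
    if PySem.Set.contains s n then uniqDed s rest
    else n :: uniqDed (PySem.Set.add s n) rest

def uniqNames (els : List (List (String × List (String × String)))) : List String :=
  els.filterMap (fun el =>
    match (PySem.Dict.mk ((PySem.Dict.mk el).getD "tags" [])).get? "name" with
    | none => none
    | some n => if n = "" then none else some n)

def truthy (ns : List (Option String)) : List String :=
  ns.filterMap (fun n? =>
    match n? with
    | none => none
    | some n => if n = "" then none else some n)

theorem uniqGoA_eq_loop (els : List (List (String × List (String × String))))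
    (s : PySem.Set String) (out : List String) :
    uniqGoA els s out = uniqLoop (uniqNames els) s out := by
  induction els generalizing s out with
  | nil => rfl
  | cons el rest ih =>
    cases h : ((PySem.Dict.mk ((PySem.Dict.mk el).getD "tags" [])).get? "name") with
    | none => simp [uniqGoA, uniqNames, h, ih]
    | some n =>
      by_cases hn : n = ""
      · simp [uniqGoA, uniqNames, h, hn, ih]
      · by_cases hc : n ∈ s
        · simp [uniqGoA, uniqLoop, uniqNames, h, hn, hc, ih]
        · simp [uniqGoA, uniqLoop, uniqNames, h, hn, hc, ih]

theorem uniqLoop_eq_take (ns : List String) (s : PySem.Set String) (out : List String)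
    (h : out.length < 5) :
    uniqLoop ns s out = out ++ (uniqDed s ns).take (5 - out.length) := by
  induction ns generalizing s out with
  | nil => simp [uniqLoop, uniqDed]
  | cons n rest ih =>
    simp only [uniqLoop, uniqDed]
    by_cases hc : n ∈ s
    · simp [hc, ih s out h]
    · by_cases h4 : 4 ≤ out.length
      · have hlen : out.length = 4 := by omega
        simp [hc, hlen]
      · have h5 : ¬ 5 ≤ (out ++ [n]).length := by simp; omega
        have hlt : (out ++ [n]).length < 5 := by simp; omega
        have ht : 5 - out.length = (5 - (out ++ [n]).length) + 1 := by simp; omega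
        simp [hc, ih _ _ hlt, ht, List.take_succ_cons]
        exact fun h' => absurd h' h4

-- B's pre-membership recursion equals A's set-based dedup, given that the set
-- agrees with pre membership on truthy names.
theorem keepB_eq_ded (rest pre : List (Option String)) (s : PySem.Set String)
    (h : ∀ n : String, n ≠ "" → (n ∈ s ↔ (some n) ∈ pre)) :
    keepB pre rest = uniqDed s (truthy rest) := by
  induction rest generalizing pre s with
  | nil => simp [keepB, truthy, uniqDed]
  | cons n? tail ih =>
    cases n? with
    | none =>
      have h' : ∀ n : String, n ≠ "" → (n ∈ s ↔ (some n) ∈ pre ++ [none]) := by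
        intro n hn; simp [h n hn]
      simp only [keepB, truthy, List.filterMap_cons]
      exact ih _ _ h'
    | some n =>
      by_cases hn : n = ""
      · subst hn
        have h' : ∀ m : String, m ≠ "" → (m ∈ s ↔ (some m) ∈ pre ++ [some ""]) := by
          intro m hm; simp [h m hm, hm]
        have e1 : keepB pre (some "" :: tail) = keepB (pre ++ [some ""]) tail := by
          simp [keepB]
        have e2 : truthy (some "" :: tail) = truthy tail := by
          simp [truthy]
        rw [e1, e2]; exact ih _ _ h'
      · by_cases hc : n ∈ s
        · have hp : (some n) ∈ pre := (h n hn).mp hc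
          have h' : ∀ m : String, m ≠ "" → (m ∈ s ↔ (some m) ∈ pre ++ [some n]) := by
            intro m hm
            by_cases hmn : m = n
            · subst hmn; simp [hc]
            · simp [h m hm, hmn]
          have e1 : keepB pre (some n :: tail) = keepB (pre ++ [some n]) tail := by
            simp [keepB, hn, hp]
          have e2 : uniqDed s (truthy (some n :: tail)) = uniqDed s (truthy tail) := by
            simp [truthy, uniqDed, hn, hc]
          rw [e1, e2]; exact ih _ _ h'
        · have hp : (some n) ∉ pre := fun hx => hc ((h n hn).mpr hx)
          have h' : ∀ m : String, m ≠ "" → (m ∈ PySem.Set.add s n ↔ (some m) ∈ pre ++ [some n]) := by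
            intro m hm
            rw [PySem.Set.mem_add]
            by_cases hmn : m = n
            · subst hmn; simp
            · simp [h m hm, hmn]
          have e1 : keepB pre (some n :: tail) = n :: keepB (pre ++ [some n]) tail := by
            simp [keepB, hn, hp]
          have e2 : uniqDed s (truthy (some n :: tail))
              = n :: uniqDed (PySem.Set.add s n) (truthy tail) := by
            simp [truthy, uniqDed, hn, hc]
          rw [e1, e2]; exact congrArg (n :: ·) (ih _ _ h')

theorem truthy_map_eq_uniqNames (els : List (List (String × List (String × String)))) :
    truthy (els.map (fun el =>
      (PySem.Dict.mk ((PySem.Dict.mk el).getD "tags" [])).get? "name")) = uniqNames els := by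
  simp [truthy, uniqNames, List.filterMap_map]

-- ===== VERDICT (by name: the statement is the Claim_ definition above) =====
theorem uniq_names_py_spec : Claim_equal_uniq_names_py := by
  intro elements _
  show uniq_names_py elements = uniq_names_py_alt elements
  rw [uniq_names_py, uniqGoA_eq_loop, uniqLoop_eq_take _ _ _ (by simp)]
  simp only [uniq_names_py_alt]
  rw [keepB_eq_ded _ _ PySem.Set.empty (by intro n _; simp [PySem.Set.empty]),
    truthy_map_eq_uniqNames]
  simp
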